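-- pv_equiv track=rewrite | github.com/pcalderong/mapasCromosomicos | utils.py | getGen
-- ===== SOURCE A (Python) =====
-- def getGen(string):
--     flag = False
--     value = ""
--     for s in string:
--         if s == "-":
--             flag = True
--         elif flag:
--             # if not s == " ":/
--             value +=s
--     return value
-- ===== SOURCE B (Python) =====
-- def getGen(string):
--     return "".join(string.split("-")[1:])
-- ===== Notes on version B (the rewrite author's own statement) =====
-- stated objective: simpler
-- what changed: Replaces the per-character flag-and-accumulate loop with a split/join decomposition: split the string on the dash delimiter and concatenate every segment after the first.
import Mathlib
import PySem

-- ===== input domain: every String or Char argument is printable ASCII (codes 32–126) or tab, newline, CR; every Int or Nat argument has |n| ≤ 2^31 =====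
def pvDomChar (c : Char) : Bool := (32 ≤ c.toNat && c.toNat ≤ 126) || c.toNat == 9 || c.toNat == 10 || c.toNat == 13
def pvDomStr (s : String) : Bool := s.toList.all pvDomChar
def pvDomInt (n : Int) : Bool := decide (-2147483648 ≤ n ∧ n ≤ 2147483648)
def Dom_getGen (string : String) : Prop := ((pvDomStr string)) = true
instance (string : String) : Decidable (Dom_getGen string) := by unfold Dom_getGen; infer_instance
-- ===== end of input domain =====

-- B splits on the dash delimiter and joins every segment after the first; A scans once with a flag. Same return value on all inputs.

-- ===== PORT A =====
-- step of A's loop: state = (flag, value); value kept as List Char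
def getGenStep (st : Bool × List Char) (s : Char) : Bool × List Char :=
  if s = '-' then (true, st.2)
  else if st.1 then (st.1, st.2 ++ [s]) else st

def getGen (string : String) : String :=
  String.mk (string.toList.foldl getGenStep (false, [])).2

-- ===== PORT B =====
-- str.split('-') ported as List.splitOn '-' (single-char separator), ''.join as flatten
def getGen_alt (string : String) : String :=
  String.mk (((string.toList.splitOn '-').drop 1).flatten)

-- ===== PRECONDITION & SPEC =====
def Spec_getGen (string : String) (out : String) : Prop := out = getGen_alt string
instance (string : String) (out : String) : Decidable (Spec_getGen string out) := by unfold Spec_getGen; infer_instance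

-- ===== CLAIM (what is proved, stated in full; the proofs are below) =====
def Claim_equal_getGen : Prop := ∀ (string : String), Dom_getGen string → Spec_getGen string (getGen string)

-- ===== LEMMAS AND PROOFS =====

-- once the flag is set, A appends every non-dash character
theorem foldl_getGenStep_true (cs : List Char) (acc : List Char) :
    cs.foldl getGenStep (true, acc) = (true, acc ++ cs.filter (fun c => !(c == '-'))) := by
  induction cs generalizing acc with
  | nil => simp
  | cons c cs ih =>
    by_cases h : c = '-' <;> simp [getGenStep, h, ih]

-- flatten of splitOnP drops exactly the separators
theorem flatten_splitOnP (p : Char → Bool) (cs : List Char) :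
    (List.splitOnP p cs).flatten = cs.filter (fun c => !(p c)) := by
  induction cs with
  | nil => simp
  | cons c cs ih =>
    rw [List.splitOnP_cons]
    by_cases h : p c
    · simp [h, ih]
    · cases hs : List.splitOnP p cs with
      | nil => exact absurd hs (List.splitOnP_ne_nil p cs)
      | cons t ts => simp [h, ← ih, hs]

theorem drop_one_modifyHead {α : Type} (f : α → α) (l : List α) :
    (l.modifyHead f).drop 1 = l.drop 1 := by
  cases l <;> rfl

-- A's fold from the unset flag computes B's value
theorem foldl_getGenStep_false (cs : List Char) :
    (cs.foldl getGenStep (false, [])).2 = ((cs.splitOn '-').drop 1).flatten := by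
  induction cs with
  | nil => rfl
  | cons c cs ih =>
    by_cases h : c = '-'
    · rw [List.foldl_cons]
      simp only [getGenStep, h, if_true]
      rw [foldl_getGenStep_true]
      simp [List.splitOn, List.splitOnP_cons, flatten_splitOnP]
    · rw [List.foldl_cons]
      simp only [getGenStep, if_neg h, Bool.false_eq_true, if_false]
      rw [ih]
      simp only [List.splitOn, List.splitOnP_cons]
      have hb : (c == '-') = false := by simp [h]
      rw [hb]
      simp only [Bool.false_eq_true, if_false, drop_one_modifyHead]

-- ===== VERDICT (by name: the statement is the Claim_ definition above) =====
theorem getGen_spec : Claim_equal_getGen := by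
  intro s _
  unfold Spec_getGen getGen getGen_alt
  rw [foldl_getGenStep_false]
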